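-- pv_equiv track=rewrite | github.com/BanjoBenjo/dima-exercis | forward_chaining.py | get_propostions
-- ===== SOURCE A (Python) =====
-- import string
--
-- basic_propositions = string.ascii_uppercase
--
-- def check_proposition(symbol):
--     if symbol in basic_propositions:
--         return True
--     return False
--
-- def check_implies(symbol):
--     if symbol == '>':
--         return True
--     return False
--
-- def get_propostions(rule):
--     propositions = []
--
--     for symbol in rule:
--         if check_proposition(symbol):
--             propositions.append(symbol)
--         if check_implies(symbol):
--             break
--
--     return propositions
-- ===== SOURCE B (Python) =====
-- def get_propostions(rule):
--     # Divide and conquer: split the string in half, solve each half, and use a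
--     # 'stopped' flag (a '>' was hit) to drop the right half's contribution.
--     def go(s):
--         if len(s) <= 1:
--             if not s or s == '>':
--                 return ([], bool(s))
--             return (([s] if 'A' <= s <= 'Z' else []), False)
--         mid = len(s) // 2
--         left, stopped = go(s[:mid])
--         if stopped:
--             return (left, True)
--         right, stopped = go(s[mid:])
--         return (left + right, stopped)
--     return go(rule)[0]
-- ===== Notes on version B (the rewrite author's own statement) =====
-- stated objective: alternative
-- what changed: Replaces A's left-to-right accumulator loop with break by a divide-and-conquer recursion: split the string in half, solve each half independently returning (letters, stopped-at-'>') pairs, and combine, discarding the right half when the left one hit '>'; the uppercase test is a range comparison instead of membership in the alphabet string.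
import Mathlib
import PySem

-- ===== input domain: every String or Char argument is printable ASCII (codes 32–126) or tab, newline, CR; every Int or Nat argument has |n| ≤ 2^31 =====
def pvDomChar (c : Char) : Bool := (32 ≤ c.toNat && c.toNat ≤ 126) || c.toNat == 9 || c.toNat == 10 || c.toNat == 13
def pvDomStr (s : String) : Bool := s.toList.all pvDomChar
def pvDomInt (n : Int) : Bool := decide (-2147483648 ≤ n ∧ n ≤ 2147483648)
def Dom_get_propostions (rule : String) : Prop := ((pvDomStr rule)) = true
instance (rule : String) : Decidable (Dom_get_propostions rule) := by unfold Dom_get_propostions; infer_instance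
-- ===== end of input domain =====

-- B replaces A's accumulator loop with break by a divide-and-conquer recursion combining (letters, stopped) halves (alternative decomposition).


-- ===== PORT A =====
def basic_propositions : List Char :=
  ['A','B','C','D','E','F','G','H','I','J','K','L','M',
   'N','O','P','Q','R','S','T','U','V','W','X','Y','Z']

def check_proposition (symbol : Char) : Bool :=
  if symbol ∈ basic_propositions then true else false

def check_implies (symbol : Char) : Bool :=
  if symbol == '>' then true else false

-- the for-loop with break, state = accumulated propositions
def get_propostions_loop : List Char → List String → List String
  | [], propositions => propositions
  | symbol :: rest, propositions =>
    let propositions :=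
      if check_proposition symbol then propositions ++ [String.ofList [symbol]] else propositions
    if check_implies symbol then propositions else get_propostions_loop rest propositions

def get_propostions (rule : String) : List String :=
  get_propostions_loop rule.toList []

-- ===== PORT B =====
-- divide and conquer: (collected letters, whether a '>' was hit in this piece)
def get_propostions_go (s : List Char) : List String × Bool :=
  if s.length ≤ 1 then
    -- length ≤ 1: empty string or a single character
    match s with
    | [] => ([], false)
    | c :: _ =>
      if c = '>' then ([], true)
      else if 'A' ≤ c ∧ c ≤ 'Z' then ([String.ofList [c]], false) else ([], false)
  else
    let mid := s.length / 2
    let left := get_propostions_go (s.take mid)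
    if left.2 then (left.1, true)
    else
      let right := get_propostions_go (s.drop mid)
      (left.1 ++ right.1, right.2)
termination_by s.length
decreasing_by all_goals (simp [List.length_take, List.length_drop]; omega)

def get_propostions_alt (rule : String) : List String :=
  (get_propostions_go rule.toList).1

-- ===== PRECONDITION & SPEC =====
def Spec_get_propostions (rule : String) (out : List String) : Prop := out = get_propostions_alt rule
instance (rule : String) (out : List String) : Decidable (Spec_get_propostions rule out) := by unfold Spec_get_propostions; infer_instance

-- ===== CLAIM =====
def Claim_equal_get_propostions : Prop := ∀ (rule : String), Dom_get_propostions rule → Spec_get_propostions rule (get_propostions rule)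

-- ===== LEMMAS AND PROOFS =====
-- common characterisation both ports are proved equal to
def pvSpecF (s : List Char) : List String :=
  ((s.takeWhile (fun c => c ≠ '>')).filter
      (fun c => decide ('A' ≤ c ∧ c ≤ 'Z'))).map (fun c => String.ofList [c])

theorem mem_basic_iff_range (c : Char) :
    c ∈ basic_propositions ↔ ('A' ≤ c ∧ c ≤ 'Z') := by
  constructor
  · intro h; fin_cases h <;> exact ⟨by decide, by decide⟩
  · rintro ⟨h1, h2⟩
    have ha : 65 ≤ c.toNat := h1
    have hb : c.toNat ≤ 90 := h2
    interval_cases h : c.toNat <;>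
      · rw [← Char.ofNat_toNat c, h]; decide

theorem get_propostions_loop_eq (l : List Char) (acc : List String) :
    get_propostions_loop l acc = acc ++ pvSpecF l := by
  induction l generalizing acc with
  | nil => simp [get_propostions_loop, pvSpecF]
  | cons c rest ih =>
    by_cases hgt : c = '>'
    · subst hgt
      simp [get_propostions_loop, pvSpecF, check_implies, check_proposition, basic_propositions]
    · have hne : (c == '>') = false := by simp [hgt]
      by_cases hup : c ∈ basic_propositions
      · have hr : 'A' ≤ c ∧ c ≤ 'Z' := (mem_basic_iff_range c).mp hup
        simp [get_propostions_loop, pvSpecF, check_implies, check_proposition,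
          hne, hup, hgt, hr, ih]
      · have hr : ¬ ('A' ≤ c ∧ c ≤ 'Z') := fun h => hup ((mem_basic_iff_range c).mpr h)
        simp [get_propostions_loop, pvSpecF, check_implies, check_proposition,
          hne, hup, hgt, hr, ih]

theorem takeWhile_append_all {α : Type} (p : α → Bool) (l r : List α) :
    (l ++ r).takeWhile p = if l.all p then l ++ r.takeWhile p else l.takeWhile p := by
  induction l with
  | nil => simp
  | cons a t ih =>
    by_cases hp : p a
    · simp [hp, ih]
      split_ifs <;> simp
    · simp [hp]

theorem get_propostions_go_eq (s : List Char) :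
    get_propostions_go s = (pvSpecF s, s.any (fun c => c == '>')) := by
  fun_induction get_propostions_go s with
  | case1 h => simp [pvSpecF]
  | case2 tail h =>
    simp [pvSpecF]
  | case3 c tail hgt hup h =>
    have htail : tail = [] := by cases tail with
      | nil => rfl
      | cons a t => simp at h
    subst htail
    simp [pvSpecF, hgt, hup]
  | case4 c tail hgt hup h =>
    have htail : tail = [] := by cases tail with
      | nil => rfl
      | cons a t => simp at h
    subst htail
    simp [pvSpecF, hgt, hup]
  | case5 x hlen mid left hstop ih =>
    have hl : left = (pvSpecF (List.take mid x), (List.take mid x).any fun c => c == '>') := ih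
    rw [hl] at hstop ⊢
    have hmem : '>' ∈ List.take mid x := by
      rcases List.any_eq_true.mp hstop with ⟨y, hy, hye⟩
      simp at hye; rwa [hye] at hy
    have hsplit : x.take mid ++ x.drop mid = x := List.take_append_drop _ x
    simp only [Prod.mk.injEq]
    constructor
    · conv_rhs => rw [← hsplit]
      simp only [pvSpecF, takeWhile_append_all]
      rw [if_neg (by simp only [List.all_eq_true]; intro hall; simpa using hall '>' hmem)]
    · conv_rhs => rw [← hsplit]
      rw [List.any_append]
      have : (List.take mid x).any (fun c => c == '>') = true := hstop
      rw [this]; rfl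
  | case6 x hlen mid left hstop right ih2 ih1 =>
    have hl : left = (pvSpecF (List.take mid x), (List.take mid x).any fun c => c == '>') := ih2
    have hr : right = (pvSpecF (List.drop mid x), (List.drop mid x).any fun c => c == '>') := ih1
    rw [hl] at hstop ⊢
    rw [hr]
    have hnotmem : '>' ∉ List.take mid x := by simpa using hstop
    have hne : ∀ y ∈ List.take mid x, ¬ y = '>' := fun y hy h => hnotmem (h ▸ hy)
    have hanyF : ((List.take mid x).any fun c => c == '>') = false := by
      refine List.any_eq_false.mpr fun y hy => ?_
      simpa using hne y hy
    have hsplit : x.take mid ++ x.drop mid = x := List.take_append_drop _ x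
    have htw : (x.take mid).takeWhile (fun c => decide (c ≠ '>')) = x.take mid :=
      List.takeWhile_eq_self_iff.mpr (by intro y hy; simpa using hne y hy)
    simp only [Prod.mk.injEq]
    constructor
    · conv_rhs => rw [← hsplit]
      simp only [pvSpecF, takeWhile_append_all]
      rw [if_pos (by simp only [List.all_eq_true]; intro y hy; simpa using hne y hy)]
      simp only [List.filter_append, List.map_append]
      congr 2
      rw [htw]
    · conv_rhs => rw [← hsplit]
      rw [List.any_append, hanyF]; rfl

-- ===== VERDICT =====
theorem get_propostions_spec : Claim_equal_get_propostions := by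
  intro rule _
  unfold Spec_get_propostions get_propostions get_propostions_alt
  rw [get_propostions_go_eq, get_propostions_loop_eq]
  simp
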